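-- pv_equiv track=rewrite | github.com/adhithyan15/coding-adventures | code/packages/python/brotli/src/coding_adventures_brotli/__init__.py | _reconstruct_canonical_codes
-- ===== SOURCE A (Python) =====
-- def _reconstruct_canonical_codes(
--     lengths: list[tuple[int, int]],
-- ) -> dict[str, int]:
--     """Reconstruct {bit_string → symbol} from sorted (symbol, length) pairs.
--
--     Returns {} for empty input.
--     Returns {"0": symbol} for a single-entry list (single-symbol tree).
--     """
--     if not lengths:
--         return {}
--     if len(lengths) == 1:
--         return {"0": lengths[0][0]}
--
--     result: dict[str, int] = {}
--     code = 0
--     prev_len = lengths[0][1]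
--     for symbol, code_len in lengths:
--         if code_len > prev_len:
--             code <<= (code_len - prev_len)
--         result[format(code, f"0{code_len}b")] = symbol
--         code += 1
--         prev_len = code_len
--     return result
-- ===== SOURCE B (Python) =====
-- def _reconstruct_canonical_codes(
--     lengths: list[tuple[int, int]],
-- ) -> dict[str, int]:
--     """Run-based count-then-assign: split into maximal runs (ending before each strict
--     length increase) recording the shift into each run, then assign each run a block of
--     consecutive codes base..base+count-1 arithmetically via enumerate."""
--     if not lengths:
--         return {}
--     if len(lengths) == 1:
--         return {"0": lengths[0][0]}
--     # pass 1: run-length profile [(shift, count), ...]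
--     runs = []
--     shift, count = 0, 1
--     for (_, prev), (_, cur) in zip(lengths, lengths[1:]):
--         if cur > prev:
--             runs.append((shift, count))
--             shift, count = cur - prev, 1
--         else:
--             count += 1
--     runs.append((shift, count))
--     # pass 2: block assignment per run
--     result = {}
--     base = 0
--     rest = lengths
--     for shift, count in runs:
--         base <<= shift
--         for k, (symbol, code_len) in enumerate(rest[:count]):
--             result[format(base + k, f"0{code_len}b")] = symbol
--         rest = rest[count:]
--         base += count
--     return result
-- ===== Notes on version B (the rewrite author's own statement) =====
-- stated objective: alternative
-- what changed: A's per-element stateful loop (conditional shift + increment at every entry) is replaced by a run-based count-then-assign scheme: pass 1 builds a run-length profile [(shift, count)] of maximal runs cut before each strict length increase, pass 2 assigns each run a block of consecutive codes base+0..base+count-1 arithmetically via enumerate.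
import Mathlib
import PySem

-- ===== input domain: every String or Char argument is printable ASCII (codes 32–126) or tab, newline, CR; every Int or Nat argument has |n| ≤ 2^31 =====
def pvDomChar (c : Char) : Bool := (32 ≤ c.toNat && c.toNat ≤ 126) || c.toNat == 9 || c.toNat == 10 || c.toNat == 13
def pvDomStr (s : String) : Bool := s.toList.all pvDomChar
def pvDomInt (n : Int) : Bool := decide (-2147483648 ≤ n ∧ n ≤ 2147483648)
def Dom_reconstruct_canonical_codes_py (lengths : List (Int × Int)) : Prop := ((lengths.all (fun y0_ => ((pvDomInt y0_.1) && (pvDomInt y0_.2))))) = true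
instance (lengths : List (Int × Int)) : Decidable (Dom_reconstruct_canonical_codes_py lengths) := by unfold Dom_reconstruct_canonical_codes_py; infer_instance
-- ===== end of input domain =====

-- B replaces A's per-element stateful loop (conditional shift + increment at every entry) by a
-- run-based count-then-assign scheme: pass 1 builds a run-length profile [(shift, count)] of the
-- maximal runs ending before each strict length increase; pass 2 gives each run a block of
-- consecutive codes base+0..base+count-1 arithmetically. Objective: alternative structure, same cost.

-- port of Python's builtin format(code, f"0{width}b") for the nonnegative codes both programs produce
-- (exact there: binary digits of code, left-padded with '0' to width; width < 0 never occurs inside Pre_)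
def pvFormatBin (code : Int) (width : Int) : String :=
  let digits := Nat.toDigits 2 code.toNat
  String.ofList (List.replicate (width.toNat - digits.length) '0' ++ digits)

-- ===== PORT A =====
def reconstruct_canonical_codes_py (lengths : List (Int × Int)) : List (String × Int) :=
  match lengths with
  | [] => []
  | [(s, _)] => [("0", s)]
  | (_, l0) :: _ =>
    -- single pass: state (result, code, prev_len), shift-then-insert-then-increment
    (lengths.foldl
      (fun (st : PySem.Dict String Int × Int × Int) p =>
        let code := if p.2 > st.2.2 then st.2.1 <<< ((p.2 - st.2.2).toNat : Int) else st.2.1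
        (st.1.insert (pvFormatBin code p.2) p.1, code + 1, p.2))
      (PySem.Dict.empty, 0, l0)).1.items

-- ===== PORT B =====
-- pass 1: the run-length profile [(shift, count)], appending the pending run before each strict increase
def pvPass1 (lengths : List (Int × Int)) : List (Int × Int) :=
  let st := (List.zip lengths lengths.tail).foldl
    (fun (st : List (Int × Int) × Int × Int) pq =>
      if pq.2.2 > pq.1.2 then (st.1 ++ [(st.2.1, st.2.2)], pq.2.2 - pq.1.2, 1)
      else (st.1, st.2.1, st.2.2 + 1))
    ([], 0, 1)
  st.1 ++ [(st.2.1, st.2.2)]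

def reconstruct_canonical_codes_py_alt (lengths : List (Int × Int)) : List (String × Int) :=
  if lengths.isEmpty then []
  else if lengths.length == 1 then [("0", lengths.headI.1)]
  else
    -- pass 2: per run, shift the base and assign base+k over enumerate(rest[:count])
    ((pvPass1 lengths).foldl
      (fun (acc : PySem.Dict String Int × Int × List (Int × Int)) r =>
        let base := acc.2.1 <<< (r.1.toNat : Int)
        let d := (PySem.List.enumerate (acc.2.2.take r.2.toNat)).foldl
          (fun (d : PySem.Dict String Int) kp =>
            d.insert (pvFormatBin (base + kp.1) kp.2.2) kp.2.1) acc.1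
        (d, base + r.2, acc.2.2.drop r.2.toNat))
      (PySem.Dict.empty, 0, lengths)).1.items

-- ===== PRECONDITION & SPEC =====
-- Pre_ excludes exactly the inputs where Python A raises ValueError: with two or more entries, a
-- negative code length makes format's spec f"0{code_len}b" invalid (a single entry never formats).
def Pre_reconstruct_canonical_codes_py (lengths : List (Int × Int)) : Prop :=
  lengths.length ≤ 1 ∨ ∀ p ∈ lengths, 0 ≤ p.2
instance (lengths : List (Int × Int)) : Decidable (Pre_reconstruct_canonical_codes_py lengths) := by
  unfold Pre_reconstruct_canonical_codes_py; infer_instance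
def pvWitness_reconstruct_canonical_codes_py : (List (Int × Int)) := [(1, 2), (2, 2), (3, 3)]
def Spec_reconstruct_canonical_codes_py (lengths : List (Int × Int)) (out : List (String × Int)) : Prop := out = reconstruct_canonical_codes_py_alt lengths
instance (lengths : List (Int × Int)) (out : List (String × Int)) : Decidable (Spec_reconstruct_canonical_codes_py lengths out) := by unfold Spec_reconstruct_canonical_codes_py; infer_instance

-- ===== CLAIM (what is proved, stated in full; the proofs are below) =====
def Claim_equal_reconstruct_canonical_codes_py : Prop := ∀ (lengths : List (Int × Int)), Dom_reconstruct_canonical_codes_py lengths → Pre_reconstruct_canonical_codes_py lengths → Spec_reconstruct_canonical_codes_py lengths (reconstruct_canonical_codes_py lengths)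

-- ===== LEMMAS AND PROOFS =====

-- the run profile B's pass 1 computes, as a structural recursion: runs of the length sequence,
-- cut before each strict increase, carrying the pending run's (shift, count)
def pvRuns (shift cnt prev : Int) : List (Int × Int) → List (Int × Int)
  | [] => [(shift, cnt)]
  | p :: t =>
    if p.2 > prev then (shift, cnt) :: pvRuns (p.2 - prev) 1 p.2 t
    else pvRuns shift (cnt + 1) p.2 t

-- B's pass-1 fold computes pvRuns
theorem pvRunsEq (t : List (Int × Int)) :
    ∀ (a : Int × Int) (rs : List (Int × Int)) (shift cnt : Int),
    (let st := (List.zip (a :: t) t).foldl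
      (fun (st : List (Int × Int) × Int × Int) pq =>
        if pq.2.2 > pq.1.2 then (st.1 ++ [(st.2.1, st.2.2)], pq.2.2 - pq.1.2, 1)
        else (st.1, st.2.1, st.2.2 + 1))
      (rs, shift, cnt)
     st.1 ++ [(st.2.1, st.2.2)])
    = rs ++ pvRuns shift cnt a.2 t := by
  induction t with
  | nil => intro a rs shift cnt; rfl
  | cons b t' ih =>
    intro a rs shift cnt
    simp only [List.zip_cons_cons, List.foldl_cons, pvRuns]
    by_cases h : b.2 > a.2
    · simp only [if_pos h]
      rw [ih b (rs ++ [(shift, cnt)]) (b.2 - a.2) 1, List.append_assoc, List.singleton_append]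
    · simp only [if_neg h]
      exact ih b rs shift (cnt + 1)

theorem pvPass1_eq (a : Int × Int) (t : List (Int × Int)) :
    pvPass1 (a :: t) = pvRuns 0 1 a.2 t := by
  have := pvRunsEq t a [] 0 1
  simpa [pvPass1] using this

-- A's loop body and B's run-flush step, named (definitionally equal to the ports' lambdas)
def pvStepA (st : PySem.Dict String Int × Int × Int) (p : Int × Int) :
    PySem.Dict String Int × Int × Int :=
  (st.1.insert
     (pvFormatBin (if p.2 > st.2.2 then st.2.1 <<< ((p.2 - st.2.2).toNat : Int) else st.2.1) p.2) p.1,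
   (if p.2 > st.2.2 then st.2.1 <<< ((p.2 - st.2.2).toNat : Int) else st.2.1) + 1, p.2)

def pvInsertRun (d : PySem.Dict String Int) (c0 : Int) (pre : List (Int × Int)) :
    PySem.Dict String Int :=
  (PySem.List.enumerate pre).foldl
    (fun (d : PySem.Dict String Int) kp =>
      d.insert (pvFormatBin (c0 + kp.1) kp.2.2) kp.2.1) d

def pvStepB (acc : PySem.Dict String Int × Int × List (Int × Int)) (r : Int × Int) :
    PySem.Dict String Int × Int × List (Int × Int) :=
  (pvInsertRun acc.1 (acc.2.1 <<< (r.1.toNat : Int)) (acc.2.2.take r.2.toNat),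
   acc.2.1 <<< (r.1.toNat : Int) + r.2, acc.2.2.drop r.2.toNat)

theorem pvInsertRun_append_singleton (d : PySem.Dict String Int) (c0 : Int)
    (pre : List (Int × Int)) (p : Int × Int) :
    pvInsertRun d c0 (pre ++ [p])
      = (pvInsertRun d c0 pre).insert (pvFormatBin (c0 + pre.length) p.2) p.1 := by
  unfold pvInsertRun
  rw [PySem.List.enumerate_append, List.foldl_append]
  simp [PySem.List.enumerate_cons, PySem.List.enumerate_nil]

theorem pvInsertRun_singleton (d : PySem.Dict String Int) (c0 : Int) (p : Int × Int) :
    pvInsertRun d c0 [p] = d.insert (pvFormatBin c0 p.2) p.1 := by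
  simp [pvInsertRun, PySem.List.enumerate_cons, PySem.List.enumerate_nil]

-- the deferred-run invariant: A (having already inserted the pending run pre with consecutive
-- codes from base <<< shift) and B (which flushes pre when it reads the next run entry) agree
theorem pvMain (t : List (Int × Int)) :
    ∀ (pre : List (Int × Int)) (d : PySem.Dict String Int) (base shift cnt prev : Int),
    1 ≤ cnt → pre.length = cnt.toNat →
    (t.foldl pvStepA
      (pvInsertRun d (base <<< (shift.toNat : Int)) pre,
       base <<< (shift.toNat : Int) + cnt, prev)).1
    = ((pvRuns shift cnt prev t).foldl pvStepB (d, base, pre ++ t)).1 := by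
  induction t with
  | nil =>
    intro pre d base shift cnt prev h1 h2
    simp only [pvRuns, List.foldl_nil, List.foldl_cons, pvStepB, List.append_nil]
    rw [List.take_of_length_le (by omega)]
  | cons p t' ih =>
    intro pre d base shift cnt prev h1 h2
    simp only [pvRuns]
    by_cases h : p.2 > prev
    · simp only [if_pos h, List.foldl_cons]
      have hA : pvStepA (pvInsertRun d (base <<< (shift.toNat : Int)) pre,
            base <<< (shift.toNat : Int) + cnt, prev) p
          = ((pvInsertRun d (base <<< (shift.toNat : Int)) pre).insert
              (pvFormatBin ((base <<< (shift.toNat : Int) + cnt) <<< (((p.2 - prev).toNat : Int))) p.2) p.1,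
             (base <<< (shift.toNat : Int) + cnt) <<< (((p.2 - prev).toNat : Int)) + 1, p.2) := by
        simp [pvStepA, if_pos h]
      have hB : pvStepB (d, base, pre ++ p :: t') (shift, cnt)
          = (pvInsertRun d (base <<< (shift.toNat : Int)) pre,
             base <<< (shift.toNat : Int) + cnt, p :: t') := by
        simp only [pvStepB]
        rw [List.take_append_of_le_length (by omega), List.drop_append_of_le_length (by omega),
            List.take_of_length_le (by omega), List.drop_of_length_le (by omega)]
        simp
      rw [hA, hB]
      have := ih [p] (pvInsertRun d (base <<< (shift.toNat : Int)) pre)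
        (base <<< (shift.toNat : Int) + cnt) (p.2 - prev) 1 p.2 le_rfl rfl
      rw [pvInsertRun_singleton] at this
      simpa using this
    · simp only [if_neg h, List.foldl_cons]
      have hlen : ((pre.length : Int)) = cnt := by omega
      have hA : pvStepA (pvInsertRun d (base <<< (shift.toNat : Int)) pre,
            base <<< (shift.toNat : Int) + cnt, prev) p
          = (pvInsertRun d (base <<< (shift.toNat : Int)) (pre ++ [p]),
             base <<< (shift.toNat : Int) + cnt + 1, p.2) := by
        simp only [pvStepA, if_neg h]
        rw [pvInsertRun_append_singleton, hlen]
      rw [hA]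
      have := ih (pre ++ [p]) d base shift (cnt + 1) p.2 (by omega)
        (by simp [h2]; omega)
      simpa [List.append_assoc, add_assoc] using this

-- ===== VERDICT (by name: the statement is the Claim_ definition above) =====
theorem reconstruct_canonical_codes_py_spec : Claim_equal_reconstruct_canonical_codes_py := by
  intro lengths _ _
  unfold Spec_reconstruct_canonical_codes_py
  match lengths with
  | [] => rfl
  | [(s, l)] => rfl
  | a :: b :: t =>
    have e1 : reconstruct_canonical_codes_py (a :: b :: t)
        = (((b :: t).foldl pvStepA
            (PySem.Dict.empty.insert (pvFormatBin 0 a.2) a.1, 1, a.2)).1).items := by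
      show (((a :: b :: t).foldl pvStepA (PySem.Dict.empty, 0, a.2)).1).items = _
      rw [List.foldl_cons]
      simp [pvStepA]
    have e2 : reconstruct_canonical_codes_py_alt (a :: b :: t)
        = (((pvPass1 (a :: b :: t)).foldl pvStepB
            (PySem.Dict.empty, 0, a :: b :: t)).1).items := by
      unfold reconstruct_canonical_codes_py_alt
      rw [if_neg (by simp), if_neg (by simp)]
      rfl
    have key := pvMain (b :: t) [a] PySem.Dict.empty 0 0 1 a.2 le_rfl rfl
    rw [pvInsertRun_singleton] at key
    rw [e1, e2, pvPass1_eq]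
    have hsh : ((0 : Int) <<< (((0 : Int).toNat : Int))) = 0 := rfl
    rw [hsh, zero_add] at key
    rw [key]
    simp
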